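-- pv_equiv track=rewrite | github.com/JohannesAlmroth/thesis-johannes.almroth | scripts/main.py | total_delta
-- ===== SOURCE A (Python) =====
-- def total_delta(l):
-- 	prev = l[0]
-- 	total_delta = 0
-- 	for x in l[1:]:
-- 		new_delta = prev - x
-- 		total_delta += new_delta
-- 		x = prev
-- 	return total_delta
-- ===== SOURCE B (Python) =====
-- def total_delta(l):
-- 	n = len(l)
-- 	first = l[0]
-- 	return (n - 1) * first - sum(l[1:])
-- ===== Notes on version B (the rewrite author's own statement) =====
-- stated objective: simpler
-- what changed: Replaces the element-by-element accumulation loop with the closed form (n-1)*l[0] - sum(l[1:]).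
import Mathlib
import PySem

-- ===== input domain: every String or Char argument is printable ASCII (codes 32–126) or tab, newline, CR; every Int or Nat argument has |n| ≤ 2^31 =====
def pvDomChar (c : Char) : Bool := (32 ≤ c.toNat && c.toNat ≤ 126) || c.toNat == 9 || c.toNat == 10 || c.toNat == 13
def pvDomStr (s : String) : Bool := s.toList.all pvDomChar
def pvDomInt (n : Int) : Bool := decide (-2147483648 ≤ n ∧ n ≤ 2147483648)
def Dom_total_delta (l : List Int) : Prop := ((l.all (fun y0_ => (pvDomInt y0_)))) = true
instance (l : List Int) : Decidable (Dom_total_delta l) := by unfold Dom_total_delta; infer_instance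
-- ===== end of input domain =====

-- B replaces A's running-total loop with the closed form (n-1)*l[0] - sum(l[1:]) (objective: simpler).

-- ===== PORT A =====
-- prev = l[0]; total = 0; for x in l[1:]: total += prev - x; return total
def total_delta (l : List Int) : Int :=
  let prev := (PySem.List.pyGet? l 0).getD 0
  (PySem.List.slice l (some 1) none).foldl (fun td x => td + (prev - x)) 0

-- ===== PORT B =====
-- n = len(l); first = l[0]; return (n-1)*first - sum(l[1:])
def total_delta_alt (l : List Int) : Int :=
  let n : Int := l.length
  let first := (PySem.List.pyGet? l 0).getD 0
  (n - 1) * first - (PySem.List.slice l (some 1) none).sum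

-- ===== PRECONDITION & SPEC =====
-- Pre_ excludes only the empty list, on which both A and B raise IndexError at l[0].
def Pre_total_delta (l : List Int) : Prop := l ≠ []
instance (l : List Int) : Decidable (Pre_total_delta l) := by unfold Pre_total_delta; infer_instance
def pvWitness_total_delta : List Int := [3, 1, 2]

def Spec_total_delta (l : List Int) (out : Int) : Prop := out = total_delta_alt l
instance (l : List Int) (out : Int) : Decidable (Spec_total_delta l out) := by unfold Spec_total_delta; infer_instance

-- ===== CLAIM =====
def Claim_equal_total_delta : Prop := ∀ (l : List Int), Dom_total_delta l → Pre_total_delta l → Spec_total_delta l (total_delta l)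

-- ===== LEMMAS AND PROOFS =====
theorem foldl_delta (xs : List Int) (p a : Int) :
    xs.foldl (fun td x => td + (p - x)) a = a + (xs.length : Int) * p - xs.sum := by
  induction xs generalizing a with
  | nil => simp
  | cons h t ih => simp [List.foldl_cons, ih]; ring

-- ===== VERDICT =====
theorem total_delta_spec : Claim_equal_total_delta := by
  intro l _ hpre
  cases l with
  | nil => exact absurd rfl hpre
  | cons h t =>
    unfold Spec_total_delta total_delta total_delta_alt
    simp [PySem.List.slice_from_one, PySem.List.pyGet?, PySem.List.pyIdx?, foldl_delta]
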